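-- pv_equiv track=rewrite | github.com/981377660LMT/algorithm-study | 1_stack/单调栈/倒序遍历/6157. 二进制字符串重新安排顺序需要的时间.py | secondsToRemoveOccurrences2
-- ===== SOURCE A (Python) =====
-- def secondsToRemoveOccurrences2(s: str) -> int:
--     """https://leetcode.cn/problems/time-needed-to-rearrange-a-binary-string/solution/by-newhar-o6a1/"""
--     # 非常想以前单调栈那道题1_stack/单调栈/倒序遍历/2289. 使数组按非递减顺序排列-单调栈携带额外信息.py
--     # 从左到右枚举每个1，每个1的最大移动次数等于max(前一个1的最大移动次数+1，前面0的总数)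
--     res, zero = 0, 0
--     for char in s:
--         if char == "0":
--             zero += 1
--         elif zero:
--             res = max(res + 1, zero)
--     return res
-- ===== SOURCE B (Python) =====
-- def secondsToRemoveOccurrences2(s: str) -> int:
--     # Closed form: collect the zero-count before each swap-eligible one-character;
--     # the answer is max over those counts z_i of z_i + (k - 1 - i).
--     zs = []
--     zero = 0
--     for c in s:
--         if c == "0":
--             zero += 1
--         elif zero > 0:
--             zs.append(zero)
--     k = len(zs)
--     return max((z + (k - 1 - i) for i, z in enumerate(zs)), default=0)
-- ===== Notes on version B (the rewrite author's own statement) =====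
-- stated objective: alternative
-- what changed: B replaces A's running recurrence res = max(res+1, zero) with a closed form: it collects the zero-count z_i before each swap-eligible one-character and returns max_i (z_i + (k-1-i)), 0 for an empty collection.
import Mathlib
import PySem

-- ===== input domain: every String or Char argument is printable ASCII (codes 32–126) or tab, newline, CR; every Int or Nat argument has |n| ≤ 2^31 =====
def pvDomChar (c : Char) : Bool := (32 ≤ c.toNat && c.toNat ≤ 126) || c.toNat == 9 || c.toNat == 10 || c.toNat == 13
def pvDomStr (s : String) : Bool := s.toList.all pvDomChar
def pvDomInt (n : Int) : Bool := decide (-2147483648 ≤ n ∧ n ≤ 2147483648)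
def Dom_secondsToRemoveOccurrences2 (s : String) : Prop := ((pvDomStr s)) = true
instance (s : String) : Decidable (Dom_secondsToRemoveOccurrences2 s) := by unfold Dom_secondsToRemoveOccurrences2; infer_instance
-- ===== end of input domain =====

-- B replaces A's running max-recurrence with a closed form over the collected zero-counts; objective: alternative.

-- ===== PORT A =====
-- literal port of A: one pass with res/zero, `elif zero:` is zero ≠ 0 (Python truthiness)
def secondsToRemoveOccurrences2 (s : String) : Int :=
  (s.toList.foldl (fun (st : Int × Int) c =>
    if c = '0' then (st.1, st.2 + 1)
    else if st.2 ≠ 0 then (max (st.1 + 1) st.2, st.2)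
    else st) (0, 0)).1

-- ===== PORT B =====
-- literal port of Source B: collect zero-counts zs, then max (z + (k-1-i)) with default 0
def secondsToRemoveOccurrences2_alt (s : String) : Int :=
  let zs := (s.toList.foldl (fun (st : List Int × Int) c =>
    if c = '0' then (st.1, st.2 + 1)
    else if st.2 > 0 then (st.1 ++ [st.2], st.2)
    else st) ([], 0)).1
  let k : Int := zs.length
  match zs.zipIdx.map (fun p => p.1 + (k - 1 - (p.2 : Int))) with
  | [] => 0
  | v :: vs => vs.foldl max v

-- ===== PRECONDITION & SPEC =====
def Spec_secondsToRemoveOccurrences2 (s : String) (out : Int) : Prop := out = secondsToRemoveOccurrences2_alt s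
instance (s : String) (out : Int) : Decidable (Spec_secondsToRemoveOccurrences2 s out) := by unfold Spec_secondsToRemoveOccurrences2; infer_instance

-- ===== CLAIM (what is proved, stated in full; the proofs are below) =====
def Claim_equal_secondsToRemoveOccurrences2 : Prop := ∀ (s : String), Dom_secondsToRemoveOccurrences2 s → Spec_secondsToRemoveOccurrences2 s (secondsToRemoveOccurrences2 s)

-- ===== LEMMAS AND PROOFS =====

-- A's recurrence as a function of the collected zero-counts
def pvG (zs : List Int) : Int := zs.foldl (fun acc z => max (acc + 1) z) 0

-- B's closed-form evaluation of a zero-count list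
def pvF (zs : List Int) : Int :=
  match zs.zipIdx.map (fun p => p.1 + ((zs.length : Int) - 1 - (p.2 : Int))) with
  | [] => 0
  | v :: vs => vs.foldl max v

lemma pvG_append (zs : List Int) (z : Int) : pvG (zs ++ [z]) = max (pvG zs + 1) z := by
  simp [pvG, List.foldl_append]

lemma foldl_max_append (v z : Int) (l : List Int) :
    List.foldl max v (l ++ [z]) = max (List.foldl max v l) z := by
  simp [List.foldl_append]

lemma foldl_max_map_add_one (l : List Int) : ∀ v : Int,
    List.foldl max (v + 1) (l.map (· + 1)) = List.foldl max v l + 1 := by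
  induction l with
  | nil => intro v; simp
  | cons a t ih =>
      intro v
      simp only [List.map_cons, List.foldl_cons, max_add_add_right]
      exact ih (max v a)

lemma pvF_eq_pvG (zs : List Int) (h : ∀ z ∈ zs, 1 ≤ z) : pvF zs = pvG zs := by
  induction zs using List.reverseRecOn with
  | nil => rfl
  | append_singleton t z ih =>
      have hz : 1 ≤ z := h z (by simp)
      have ht : ∀ w ∈ t, 1 ≤ w := fun w hw => h w (by simp [hw])
      rw [pvG_append, ← ih ht]
      unfold pvF
      rw [List.zipIdx_append]
      simp only [List.map_append, List.length_append, List.length_singleton]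
      have hmap : (t.zipIdx.map fun p => p.1 + (((t.length : Int) + 1) - 1 - (p.2 : Int)))
          = (t.zipIdx.map fun p => p.1 + ((t.length : Int) - 1 - (p.2 : Int))).map (· + 1) := by
        simp only [List.map_map]
        apply List.map_congr_left
        intro p _
        simp [Function.comp]
        ring
      have hlast : ([z].zipIdx (0 + t.length)).map
            (fun p => p.1 + (((t.length : Int) + 1) - 1 - (p.2 : Int))) = [z] := by
        simp [List.zipIdx]
      push_cast
      rw [hmap, hlast]
      cases ht2 : t.zipIdx.map (fun p => p.1 + ((t.length : Int) - 1 - (p.2 : Int))) with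
      | nil =>
          -- t is empty: result is [z]; pvF t = 0 and max (0+1) z = z since 1 ≤ z
          have : t = [] := by
            by_contra hne
            cases t with
            | nil => exact hne rfl
            | cons a u => simp [List.zipIdx] at ht2
          subst this
          simp only [List.map_nil, List.nil_append, List.foldl_nil]
          show z = max (pvF ([] : List Int) + 1) z
          have h0 : pvF ([] : List Int) = 0 := rfl
          rw [h0]
          omega
      | cons v vs =>
          simp only [List.map_cons, List.cons_append]
          rw [foldl_max_append, foldl_max_map_add_one]

-- loop synchronisation: A's fold state is (pvG zs, zero) for B's fold state (zs, zero)
lemma pv_sync (l : List Char) : ∀ (zs : List Int) (zero : Int), 0 ≤ zero → (∀ z ∈ zs, 1 ≤ z) →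
    (l.foldl (fun (st : Int × Int) c =>
      if c = '0' then (st.1, st.2 + 1)
      else if st.2 ≠ 0 then (max (st.1 + 1) st.2, st.2)
      else st) (pvG zs, zero)).1
      = pvG (l.foldl (fun (st : List Int × Int) c =>
      if c = '0' then (st.1, st.2 + 1)
      else if st.2 > 0 then (st.1 ++ [st.2], st.2)
      else st) (zs, zero)).1
    ∧ 0 ≤ (l.foldl (fun (st : List Int × Int) c =>
      if c = '0' then (st.1, st.2 + 1)
      else if st.2 > 0 then (st.1 ++ [st.2], st.2)
      else st) (zs, zero)).2
    ∧ (∀ z ∈ (l.foldl (fun (st : List Int × Int) c =>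
      if c = '0' then (st.1, st.2 + 1)
      else if st.2 > 0 then (st.1 ++ [st.2], st.2)
      else st) (zs, zero)).1, 1 ≤ z) := by
  induction l with
  | nil => intro zs zero h0 h1; exact ⟨rfl, h0, h1⟩
  | cons c t ih =>
      intro zs zero h0 h1
      simp only [List.foldl_cons]
      by_cases hc : c = '0'
      · simp only [hc, reduceIte]
        exact ih zs (zero + 1) (by omega) h1
      · by_cases hz : zero = 0
        · simp only [if_neg hc, hz]
          simp only [ne_eq, not_true_eq_false, if_false, lt_irrefl, if_false]
          exact ih zs 0 le_rfl h1
        · have hzpos : zero > 0 := lt_of_le_of_ne h0 (Ne.symm hz)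
          have harg : ∀ z ∈ zs ++ [zero], 1 ≤ z := by
            intro z hzm
            rcases List.mem_append.1 hzm with h | h
            · exact h1 z h
            · simp at h; omega
          simp only [if_neg hc, ne_eq, hz, not_false_eq_true, if_true, if_pos hzpos, ← pvG_append]
          exact ih (zs ++ [zero]) zero h0 harg

-- ===== VERDICT (by name: the statement is the Claim_ definition above) =====
theorem secondsToRemoveOccurrences2_spec : Claim_equal_secondsToRemoveOccurrences2 := by
  intro s _
  unfold Spec_secondsToRemoveOccurrences2 secondsToRemoveOccurrences2 secondsToRemoveOccurrences2_alt
  have h := pv_sync s.toList [] 0 le_rfl (by simp)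
  simp only [show pvG [] = 0 from rfl] at h
  obtain ⟨h1, -, h4⟩ := h
  rw [h1, ← pvF_eq_pvG _ h4]
  rfl
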